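-- pv_equiv track=rewrite | github.com/Fendross/nim-tutor | app.py | nim_sum
-- ===== SOURCE A (Python) =====
-- def xor(bit1, bit2):
--     if bit1 == bit2:
--         return True
--     return False
--
-- def sort(s1, s2):
--     info = []
--
--     if len(s1) < len(s2):
--         info.append(s1)
--         info.append(s2)
--     else:
--         info.append(s2)
--         info.append(s1)
--
--     info.append(abs(len(s1) - len(s2)))
--
--     return info
--
-- def nim_sum(s1, s2):
--     is_position_secure = True
--
--     if len(s1) != len(s2):
--         s_list = sort(s1, s2)
--         s = '0' * s_list[2] + s_list[0]
--
--         for i in range(len(s)):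
--             if not xor(s[i], s_list[1][i]):
--                 is_position_secure = False
--     else:
--         for i in range(len(s1)):
--             if not xor(s1[i], s2[i]):
--                 is_position_secure = False
--
--     return is_position_secure
-- ===== SOURCE B (Python) =====
-- def nim_sum(s1, s2):
--     # Walk both strings right-to-left in lockstep; on exhausting one,
--     # the unmatched leading part of the other must be all '0'.
--     i = len(s1) - 1
--     j = len(s2) - 1
--     while i >= 0 and j >= 0:
--         if s1[i] != s2[j]:
--             return False
--         i -= 1
--         j -= 1
--     while i >= 0:
--         if s1[i] != '0':
--             return False
--         i -= 1
--     while j >= 0: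
--         if s2[j] != '0':
--             return False
--         j -= 1
--     return True
-- ===== Notes on version B (the rewrite author's own statement) =====
-- stated objective: alternative
-- what changed: Instead of selecting shorter/longer strings, building a zero-padded copy and scanning every position of it with a flag, B never pads or branches on which string is longer: it walks both strings right-to-left in lockstep with two descending indices, returning False at the first mismatch, and when one string is exhausted checks that the remaining leading characters of the other are all '0'.
import Mathlib
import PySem

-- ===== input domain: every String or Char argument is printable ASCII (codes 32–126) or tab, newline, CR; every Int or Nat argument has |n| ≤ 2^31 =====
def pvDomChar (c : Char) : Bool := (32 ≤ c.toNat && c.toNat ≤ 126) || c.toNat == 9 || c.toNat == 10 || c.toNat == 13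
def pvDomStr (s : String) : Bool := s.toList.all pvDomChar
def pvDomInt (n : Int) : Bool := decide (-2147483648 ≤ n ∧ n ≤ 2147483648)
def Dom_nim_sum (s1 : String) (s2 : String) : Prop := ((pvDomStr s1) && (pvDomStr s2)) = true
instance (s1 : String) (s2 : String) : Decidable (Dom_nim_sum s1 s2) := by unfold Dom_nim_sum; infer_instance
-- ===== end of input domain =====

-- B drops A's shorter/longer selection, zero-padded copy and flag loop: it walks both
-- strings right-to-left in lockstep and checks the leftover prefix is all '0' (objective: alternative).

-- ===== PORT A =====
-- Python helper xor(bit1, bit2): returns True iff the two characters are equal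
def pyxor (bit1 : Char) (bit2 : Char) : Bool := if bit1 == bit2 then true else false

-- Python helper sort(s1, s2): the heterogeneous list [shorter, longer, abs(len diff)] as a triple
def sortHelper (s1 : List Char) (s2 : List Char) : List Char × List Char × Nat :=
  if s1.length < s2.length then (s1, s2, ((s1.length : Int) - (s2.length : Int)).natAbs)
  else (s2, s1, ((s1.length : Int) - (s2.length : Int)).natAbs)

-- literal port of A: pads the shorter string with '0's, then a flag loop over every index.
-- All indices in both loops are in range, so List.getD is exact for Python's s[i].
def nim_sum (s1 : String) (s2 : String) : Bool :=
  let l1 := s1.toList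
  let l2 := s2.toList
  if l1.length ≠ l2.length then
    let sList := sortHelper l1 l2
    let s := List.replicate sList.2.2 '0' ++ sList.1
    (List.range s.length).foldl
      (fun acc i => if ¬ pyxor (s.getD i ' ') (sList.2.1.getD i ' ') then false else acc) true
  else
    (List.range l1.length).foldl
      (fun acc i => if ¬ pyxor (l1.getD i ' ') (l2.getD i ' ') then false else acc) true

-- ===== PORT B =====
-- Source B's descending two-index walk, as structural recursion over the two REVERSED
-- character lists: the cons/cons case is the lockstep loop (early exit on mismatch),
-- the two base cases are Source B's trailing all-'0' loops on the unexhausted string.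
def cmpRev : List Char → List Char → Bool
  | [], ys => ys.all (fun c => c == '0')
  | x :: xs, [] => (x :: xs).all (fun c => c == '0')
  | x :: xs, y :: ys => x == y && cmpRev xs ys

def nim_sum_alt (s1 : String) (s2 : String) : Bool :=
  cmpRev s1.toList.reverse s2.toList.reverse

-- ===== PRECONDITION & SPEC =====
def Spec_nim_sum (s1 : String) (s2 : String) (out : Bool) : Prop := out = nim_sum_alt s1 s2
instance (s1 : String) (s2 : String) (out : Bool) : Decidable (Spec_nim_sum s1 s2 out) := by unfold Spec_nim_sum; infer_instance

-- ===== CLAIM (what is proved, stated in full; the proofs are below) =====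
def Claim_equal_nim_sum : Prop := ∀ (s1 : String) (s2 : String), Dom_nim_sum s1 s2 → Spec_nim_sum s1 s2 (nim_sum s1 s2)

-- ===== LEMMAS AND PROOFS =====

-- A's flag loop is the conjunction of the per-index tests
lemma foldl_flag (p : Nat → Bool) (n : Nat) (acc : Bool) :
    (List.range n).foldl (fun a i => if ¬ p i then false else a) acc
      = (acc && (List.range n).all p) := by
  induction n generalizing acc with
  | zero => simp
  | succ n ih =>
      rw [List.range_succ]
      simp only [List.foldl_append, List.foldl_cons, List.foldl_nil, List.all_append,
        List.all_cons, List.all_nil, ih]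
      by_cases h : p n <;> simp [h]

-- the per-index equality test over equal-length lists is list equality
lemma all_getD_eq (a b : List Char) (h : a.length = b.length) :
    ((List.range a.length).all (fun i => a.getD i ' ' == b.getD i ' ')) = (a == b) := by
  rw [Bool.eq_iff_iff]
  simp only [List.all_eq_true, List.mem_range, beq_iff_eq]
  constructor
  · intro hp
    apply List.ext_getElem h
    intro i h1 h2
    have := hp i h1
    simpa [List.getD_eq_getElem?_getD, List.getElem?_eq_getElem, h1, h2] using this
  · rintro rfl i hi; rfl

-- "padded shorter = longer" is "prefix all zeros and tail = shorter"
lemma padded_eq_split (a b : List Char) (d : Nat) (h : d + a.length = b.length) :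
    ((List.replicate d '0' ++ a : List Char) == b)
      = ((b.take d).all (fun c => c == '0') && (b.drop d == a)) := by
  rw [Bool.eq_iff_iff]
  simp only [Bool.and_eq_true, List.all_eq_true, beq_iff_eq]
  constructor
  · rintro rfl
    constructor
    · intro x hx
      rw [List.take_append_of_le_length (by simp)] at hx
      simp only [List.take_replicate, List.mem_replicate] at hx
      exact hx.2
    · rw [List.drop_append_of_le_length (by simp)]
      simp
  · rintro ⟨hz, hd⟩
    have hlen : (b.take d).length = d := by
      rw [List.length_take]
      omega
    have htake : b.take d = List.replicate d '0' := by
      rw [List.eq_replicate_iff]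
      exact ⟨hlen, hz⟩
    calc List.replicate d '0' ++ a = b.take d ++ b.drop d := by rw [htake, hd]
      _ = b := List.take_append_drop d b

lemma pyxor_eq (x y : Char) : pyxor x y = (x == y) := by
  by_cases h : x == y <;> simp [pyxor, h]

-- the common unequal-length branch of A: on (shorter, longer) it is the split test
lemma branch_eq (a b : List Char) (hlt : a.length < b.length) :
    (List.range (List.replicate (((a.length : Int) - (b.length : Int)).natAbs) '0' ++ a).length).foldl
      (fun acc i =>
        if ¬ pyxor ((List.replicate (((a.length : Int) - (b.length : Int)).natAbs) '0' ++ a).getD i ' ')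
            (b.getD i ' ') then false else acc) true
      = ((b.take (b.length - a.length)).all (fun c => c == '0') && (b.drop (b.length - a.length) == a)) := by
  have hd : (((a.length : Int) - (b.length : Int)).natAbs) = b.length - a.length := by omega
  have hlen : (List.replicate (((a.length : Int) - (b.length : Int)).natAbs) '0' ++ a).length = b.length := by
    simp [hd]; omega
  simp only [pyxor_eq]
  rw [foldl_flag, Bool.true_and, all_getD_eq _ _ hlen, hd]
  exact padded_eq_split a b (b.length - a.length) (by omega)

-- B's recursion is symmetric in its two arguments
lemma cmpRev_comm (xs ys : List Char) : cmpRev xs ys = cmpRev ys xs := by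
  induction xs generalizing ys with
  | nil => cases ys <;> simp [cmpRev]
  | cons x xs ih =>
      cases ys with
      | nil => simp [cmpRev]
      | cons y ys => simp [cmpRev, ih, BEq.comm]

-- characterisation of B's recursion when the first list is no longer than the second
lemma cmpRev_le (xs ys : List Char) (h : xs.length ≤ ys.length) :
    cmpRev xs ys = ((xs == ys.take xs.length) && (ys.drop xs.length).all (fun c => c == '0')) := by
  induction xs generalizing ys with
  | nil => simp [cmpRev]
  | cons x xs ih =>
      cases ys with
      | nil => simp at h
      | cons y ys =>
          simp only [List.length_cons, Nat.add_le_add_iff_right] at h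
          simp only [cmpRev, ih ys h, List.length_cons, List.take_succ_cons,
            List.drop_succ_cons, List.cons_beq_cons]
          by_cases hxy : x == y <;> simp [hxy]

-- on reversed inputs the characterisation becomes the split test on the originals
lemma cmpRev_rev (a b : List Char) (h : a.length ≤ b.length) :
    cmpRev a.reverse b.reverse
      = ((b.take (b.length - a.length)).all (fun c => c == '0') && (b.drop (b.length - a.length) == a)) := by
  rw [cmpRev_le _ _ (by simpa using h)]
  have htake : b.reverse.take a.reverse.length = (b.drop (b.length - a.length)).reverse := by
    rw [List.reverse_drop]
    congr 1
    simp
    omega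
  have hdrop : b.reverse.drop a.reverse.length = (b.take (b.length - a.length)).reverse := by
    rw [List.reverse_take]
    congr 1
    simp
    omega
  rw [htake, hdrop, Bool.eq_iff_iff]
  simp only [Bool.and_eq_true, beq_iff_eq, List.all_reverse, List.reverse_eq_iff, List.reverse_reverse]
  constructor <;> rintro ⟨h1, h2⟩
  · exact ⟨h2, h1.symm⟩
  · exact ⟨h2.symm, h1⟩

-- ===== VERDICT (by name: the statement is the Claim_ definition above) =====
theorem nim_sum_spec : Claim_equal_nim_sum := by
  intro s1 s2 _
  unfold Spec_nim_sum nim_sum nim_sum_alt sortHelper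
  by_cases heq : s1.toList.length = s2.toList.length
  · -- equal lengths: both sides are plain list equality
    simp only [ne_eq, pyxor_eq]
    rw [if_neg (by simp [heq])]
    rw [foldl_flag, Bool.true_and, all_getD_eq _ _ heq,
      cmpRev_rev _ _ (le_of_eq heq), heq]
    simp only [Nat.sub_self, List.take_zero, List.all_nil, List.drop_zero, Bool.true_and, BEq.comm]
  · by_cases hlt : s1.toList.length < s2.toList.length
    · simp only [ne_eq, heq, not_false_eq_true, if_pos, hlt]
      rw [branch_eq s1.toList s2.toList hlt, cmpRev_rev _ _ (le_of_lt hlt)]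
    · have hlt2 : s2.toList.length < s1.toList.length := by omega
      simp only [ne_eq, heq, not_false_eq_true, if_pos, hlt, if_false]
      have hA := branch_eq s2.toList s1.toList hlt2
      rw [show ((s2.toList.length : Int) - (s1.toList.length : Int)).natAbs
            = ((s1.toList.length : Int) - (s2.toList.length : Int)).natAbs from by omega] at hA
      rw [hA, cmpRev_comm, cmpRev_rev _ _ (le_of_lt hlt2)]
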